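-- pv_equiv track=rewrite | github.com/ceduarte31/micropad | src/microref/filter.py | _find_matching_files
-- ===== SOURCE A (Python) =====
-- def _find_matching_files(file_tree: list, patterns: set[str]) -> set[str]:
--     """
--     Find files matching the given patterns.
--
--     Matching logic:
--     - For patterns starting with '.': Check if file ends with that extension
--     - For patterns without '.': Check if file ends with '/{pattern}' or equals pattern
--     """
--     if not isinstance(file_tree, list) or not patterns:
--         return set()
--
--     matched_paths = set()
--     file_paths = [f.get("path") for f in file_tree if f.get("path")]
--
--     for path in file_paths:
--         for pattern in patterns:
--             if pattern.startswith('.'):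
--                 # Extension matching
--                 if path.endswith(pattern):
--                     matched_paths.add(path)
--                     break
--             else:
--                 # Filename matching
--                 if path.endswith('/' + pattern) or path == pattern:
--                     matched_paths.add(path)
--                     break
--
--     return matched_paths
-- ===== SOURCE B (Python) =====
-- def _find_matching_files(file_tree: list, patterns: set[str]) -> set[str]:
--     """Find files matching the given patterns (set lookups instead of a
--     per-file scan over all patterns)."""
--     ext_pats = [p for p in patterns if p.startswith('.')]
--     name_set = {p for p in patterns if not p.startswith('.')}
--     matched = set()
--     for f in file_tree:
--         path = f.get("path")
--         if not path:
--             continue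
--         ok = (path in name_set
--               or any(path[i] == '/' and path[i + 1:] in name_set
--                      for i in range(len(path)))
--               or any(path.endswith(e) for e in ext_pats))
--         if ok:
--             matched.add(path)
--     return matched
-- ===== Notes on version B (the rewrite author's own statement) =====
-- stated objective: alternative
-- what changed: Instead of testing every pattern against every path, B splits the patterns once into an extension list and a set of the remaining patterns, and matches each path by set lookups on the path itself and on its suffix after each '/', scanning only the extension patterns per path.
import Mathlib
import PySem

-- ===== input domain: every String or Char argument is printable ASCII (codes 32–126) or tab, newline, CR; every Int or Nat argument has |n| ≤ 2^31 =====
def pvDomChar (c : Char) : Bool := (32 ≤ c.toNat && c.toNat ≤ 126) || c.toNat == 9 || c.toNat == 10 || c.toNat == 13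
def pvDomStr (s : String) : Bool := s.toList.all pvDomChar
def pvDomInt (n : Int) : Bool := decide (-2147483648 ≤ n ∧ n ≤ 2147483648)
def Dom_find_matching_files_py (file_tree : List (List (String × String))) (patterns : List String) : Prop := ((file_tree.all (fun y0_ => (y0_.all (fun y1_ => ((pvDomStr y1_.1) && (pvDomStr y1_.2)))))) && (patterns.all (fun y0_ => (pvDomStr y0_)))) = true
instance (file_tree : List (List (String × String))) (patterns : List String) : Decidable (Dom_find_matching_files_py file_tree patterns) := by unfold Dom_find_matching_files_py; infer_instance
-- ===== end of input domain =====

-- B matches each path by set lookups on the path and on its suffix after each '/' plus a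
-- scan over the extension patterns only, instead of A's per-path scan over all patterns
-- (objective: alternative). Both programs return a Python set, compared as a finite set.

-- ===== PORT A =====
-- the inner 'for pattern in patterns' loop with its break; the break only decides which
-- pattern triggers, never which path is added, so iterating the set in list order is exact
def pvInnerA (matched : PySem.Set String) (path : String) : List String → PySem.Set String
  | [] => matched
  | pattern :: rest =>
    if PySem.Str.startswith pattern "." then
      if PySem.Str.endswith path pattern then PySem.Set.add matched path
      else pvInnerA matched path rest
    else
      if PySem.Str.endswith path ("/" ++ pattern) || path == pattern then PySem.Set.add matched path
      else pvInnerA matched path rest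

def find_matching_files_py (file_tree : List (List (String × String))) (patterns : List String) : List String :=
  if patterns = [] then PySem.Set.empty
  else
    let file_paths := file_tree.filterMap (fun f =>
      match (PySem.Dict.mk f).get? "path" with
      | some p => if p == "" then none else some p
      | none => none)
    file_paths.foldl (fun matched path => pvInnerA matched path patterns) PySem.Set.empty

-- ===== PORT B =====
-- 'any(path[i] == '/' and path[i+1:] in name_set for i in range(len(path)))'
def pvTailHit (cs : List Char) (name_set : PySem.Set String) : Bool :=
  (List.range cs.length).any (fun i =>
    cs[i]? == some '/' && PySem.Set.contains name_set (String.ofList (cs.drop (i + 1))))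

def find_matching_files_py_alt (file_tree : List (List (String × String))) (patterns : List String) : List String :=
  let ext_pats := patterns.filter (fun p => PySem.Str.startswith p ".")
  let name_set : PySem.Set String :=
    PySem.Set.ofList (patterns.filter (fun p => !PySem.Str.startswith p "."))
  file_tree.foldl (fun matched f =>
    match (PySem.Dict.mk f).get? "path" with
    | none => matched
    | some path =>
      if path == "" then matched
      else
        let ok := PySem.Set.contains name_set path
                  || pvTailHit path.toList name_set
                  || ext_pats.any (fun e => PySem.Str.endswith path e)
        if ok then PySem.Set.add matched path else matched) PySem.Set.empty

-- ===== PRECONDITION & SPEC =====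
def Spec_find_matching_files_py (file_tree : List (List (String × String))) (patterns : List String) (out : List String) : Prop := out = find_matching_files_py_alt file_tree patterns
instance (file_tree : List (List (String × String))) (patterns : List String) (out : List String) : Decidable (Spec_find_matching_files_py file_tree patterns out) := by unfold Spec_find_matching_files_py; infer_instance

-- ===== CLAIM (what is proved, stated in full; the proofs are below) =====
def Claim_equal_find_matching_files_py : Prop := ∀ (file_tree : List (List (String × String))) (patterns : List String), Dom_find_matching_files_py file_tree patterns → Spec_find_matching_files_py file_tree patterns (find_matching_files_py file_tree patterns)

-- ===== LEMMAS AND PROOFS =====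

-- A's per-(path,pattern) test
def pvMatchA (path pattern : String) : Bool :=
  if PySem.Str.startswith pattern "." then PySem.Str.endswith path pattern
  else PySem.Str.endswith path ("/" ++ pattern) || path == pattern

-- B's per-path test
def pvOkB (patterns : List String) (path : String) : Bool :=
  PySem.Set.contains (PySem.Set.ofList (patterns.filter (fun p => !PySem.Str.startswith p "."))) path
  || pvTailHit path.toList (PySem.Set.ofList (patterns.filter (fun p => !PySem.Str.startswith p ".")))
  || (patterns.filter (fun p => PySem.Str.startswith p ".")).any (fun e => PySem.Str.endswith path e)

theorem pvInnerA_eq (matched : PySem.Set String) (path : String) (pats : List String) :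
    pvInnerA matched path pats =
      if pats.any (pvMatchA path) then PySem.Set.add matched path else matched := by
  induction pats with
  | nil => simp [pvInnerA]
  | cons p rest ih =>
    by_cases hs : PySem.Chars.startswith p.toList ['.'] = true
    · by_cases he : PySem.Chars.endswith path.toList p.toList = true <;>
        simp [pvInnerA, pvMatchA, hs, he, ih]
    · by_cases he : (PySem.Chars.endswith path.toList ('/' :: p.toList) = true ∨ path = p) <;>
        simp [pvInnerA, pvMatchA, hs, he, ih]

theorem pvContains_iff (l : List String) (x : String) :
    PySem.Set.contains (PySem.Set.ofList l) x = true ↔ x ∈ l := by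
  simp [PySem.Set.contains, List.contains_eq_mem, PySem.Set.mem_ofList]

theorem pvTailHit_iff (path : String) (names : List String) :
    pvTailHit path.toList (PySem.Set.ofList names) = true ↔
      ∃ n ∈ names, PySem.Str.endswith path ("/" ++ n) = true := by
  have hsl : ("/" : String).toList = ['/'] := rfl
  simp only [PySem.Str.endswith_eq, PySem.Chars.endswith_iff, String.toList_append, hsl,
    List.cons_append, List.nil_append]
  unfold pvTailHit
  simp only [List.any_eq_true, List.mem_range, Bool.and_eq_true, beq_iff_eq,
    pvContains_iff]
  generalize path.toList = cs
  constructor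
  · rintro ⟨i, hi, hget, hmem⟩
    refine ⟨String.ofList (cs.drop (i + 1)), hmem, ?_⟩
    have hslash : cs[i] = '/' := by
      have h := List.getElem?_eq_getElem hi; rw [h] at hget; exact Option.some.inj hget
    have hdrop : cs.drop i = '/' :: cs.drop (i + 1) := by
      rw [List.drop_eq_getElem_cons hi, hslash]
    rw [String.toList_ofList, ← hdrop]
    exact List.drop_suffix i cs
  · rintro ⟨n, hn, hsuf⟩
    obtain ⟨pre, hpre⟩ := hsuf
    refine ⟨pre.length, ?_, ?_, ?_⟩
    · rw [← hpre]; simp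
    · rw [← hpre]; simp
    · have hd : cs.drop (pre.length + 1) = n.toList := by
        rw [← hpre, show pre.length + 1 = (pre ++ ['/']).length by simp,
            show pre ++ '/' :: n.toList = (pre ++ ['/']) ++ n.toList by simp,
            List.drop_left]
      rw [hd, String.ofList_toList]
      exact hn

theorem pvOk_eq (path : String) (patterns : List String) :
    patterns.any (pvMatchA path) = pvOkB patterns path := by
  rw [Bool.eq_iff_iff]
  simp only [List.any_eq_true, pvOkB, Bool.or_eq_true, pvContains_iff, pvTailHit_iff,
    List.mem_filter, Bool.not_eq_eq_eq_not, Bool.not_true]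
  constructor
  · rintro ⟨p, hp, hm⟩
    unfold pvMatchA at hm
    by_cases hs : PySem.Str.startswith p "." = true
    · rw [if_pos hs] at hm
      exact Or.inr ⟨p, ⟨hp, hs⟩, hm⟩
    · rw [if_neg hs] at hm
      rw [Bool.or_eq_true] at hm
      rcases hm with he | he
      · exact Or.inl (Or.inr ⟨p, ⟨hp, Bool.eq_false_iff.mpr hs⟩, he⟩)
      · rw [beq_iff_eq] at he
        subst he
        exact Or.inl (Or.inl ⟨hp, Bool.eq_false_iff.mpr hs⟩)
  · rintro ((⟨hp, hs⟩ | ⟨n, ⟨hn, hs⟩, hsuf⟩) | ⟨e, ⟨he, hs⟩, hm⟩)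
    · refine ⟨path, hp, ?_⟩
      unfold pvMatchA
      rw [if_neg (by rw [hs]; exact Bool.false_ne_true)]
      simp
    · refine ⟨n, hn, ?_⟩
      unfold pvMatchA
      rw [if_neg (by rw [hs]; exact Bool.false_ne_true), hsuf]
      rfl
    · refine ⟨e, he, ?_⟩
      unfold pvMatchA
      rw [if_pos hs]
      exact hm

theorem pvOkB_nil (path : String) : pvOkB [] path = false := by
  simp [pvOkB, pvTailHit, PySem.Set.ofList, PySem.Set.contains]

theorem pvFoldB_eq (file_tree : List (List (String × String))) (g : String → Bool)
    (init : PySem.Set String) :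
    file_tree.foldl (fun matched f =>
      match (PySem.Dict.mk f).get? "path" with
      | none => matched
      | some path =>
        if path == "" then matched
        else if g path then PySem.Set.add matched path else matched) init =
    (file_tree.filterMap (fun f =>
      match (PySem.Dict.mk f).get? "path" with
      | some p => if p == "" then none else some p
      | none => none)).foldl
      (fun matched path => if g path then PySem.Set.add matched path else matched) init := by
  induction file_tree generalizing init with
  | nil => rfl
  | cons f rest ih =>
    simp only [List.foldl_cons, List.filterMap_cons]
    cases h : (PySem.Dict.mk f).get? "path" with
    | none => exact ih init
    | some p =>
      by_cases hp : (p == "") = true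
      · simp only [hp, if_true]; exact ih init
      · simp only [hp, if_false, Bool.false_eq_true, List.foldl_cons]
        exact ih _

theorem pvFoldl_if_false (g : String → Bool) (h : ∀ p, g p = false) (l : List String)
    (init : PySem.Set String) :
    l.foldl (fun matched path => if g path then PySem.Set.add matched path else matched) init
      = init := by
  induction l generalizing init with
  | nil => rfl
  | cons x xs ih => simp only [List.foldl_cons, h x, if_false, Bool.false_eq_true]; exact ih init

-- ===== VERDICT (by name: the statement is the Claim_ definition above) =====
theorem find_matching_files_py_spec : Claim_equal_find_matching_files_py := by
  intro file_tree patterns _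
  show find_matching_files_py file_tree patterns = find_matching_files_py_alt file_tree patterns
  have hB : find_matching_files_py_alt file_tree patterns =
      file_tree.foldl (fun matched f =>
        match (PySem.Dict.mk f).get? "path" with
        | none => matched
        | some path =>
          if path == "" then matched
          else if pvOkB patterns path then PySem.Set.add matched path else matched)
        PySem.Set.empty := rfl
  rw [hB, pvFoldB_eq]
  unfold find_matching_files_py
  by_cases hpat : patterns = []
  · subst hpat
    rw [if_pos rfl, pvFoldl_if_false (pvOkB []) pvOkB_nil]
  · rw [if_neg hpat]
    have hfun : (fun (matched : PySem.Set String) path => pvInnerA matched path patterns)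
        = (fun (matched : PySem.Set String) path =>
            if pvOkB patterns path then PySem.Set.add matched path else matched) := by
      funext m p
      rw [pvInnerA_eq, pvOk_eq]
    rw [hfun]
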